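-- pv_equiv track=rewrite | github.com/ai-Priest/AI_DATARESEARCH | src/ml/dataset_preview_generator.py | _generate_pipeline_steps
-- ===== SOURCE A (Python) =====
-- from typing import Dict, List, Optional, Any
--
-- def _generate_pipeline_steps(dataset: Dict) -> List[str]:
--     """Generate data pipeline steps."""
--     steps = ['1. Access dataset']
--     description = str(dataset.get('description', '')).lower()
--
--     # Authentication step
--     if any(term in description for term in ['api key', 'registration', 'authentication']):
--         steps.append('2. Obtain API credentials')
--         steps.append('3. Configure authentication')
--     else:
--         steps.append('2. Download/connect to data')
--
--     # Processing steps
--     if any(term in description for term in ['clean', 'preprocess', 'format']):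
--         steps.append(f'{len(steps)+1}. Clean and preprocess data')
--
--     steps.append(f'{len(steps)+1}. Validate data quality')
--     steps.append(f'{len(steps)+1}. Integrate into your system')
--
--     return steps
-- ===== SOURCE B (Python) =====
-- from typing import Dict, List
--
-- _PIPELINES = {
--     (False, False): ['1. Access dataset', '2. Download/connect to data',
--                      '3. Validate data quality', '4. Integrate into your system'],
--     (False, True):  ['1. Access dataset', '2. Download/connect to data',
--                      '3. Clean and preprocess data', '4. Validate data quality',
--                      '5. Integrate into your system'],
--     (True, False):  ['1. Access dataset', '2. Obtain API credentials',
--                      '3. Configure authentication', '4. Validate data quality',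
--                      '5. Integrate into your system'],
--     (True, True):   ['1. Access dataset', '2. Obtain API credentials',
--                      '3. Configure authentication', '4. Clean and preprocess data',
--                      '5. Validate data quality', '6. Integrate into your system'],
-- }
--
-- def _generate_pipeline_steps(dataset: Dict) -> List[str]:
--     """The output depends only on two keyword flags; look it up in a table of the four possible pipelines."""
--     description = str(dataset.get('description', '')).lower()
--     auth = any(t in description for t in ['api key', 'registration', 'authentication'])
--     clean = any(t in description for t in ['clean', 'preprocess', 'format'])
--     return list(_PIPELINES[(auth, clean)])
-- ===== Notes on version B (the rewrite author's own statement) =====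
-- stated objective: simpler
-- what changed: B replaces A's incremental list building with inline len(steps)+1 numbering by computing the two keyword flags and returning the corresponding fully precomputed pipeline from a 4-entry lookup table.
import Mathlib
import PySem

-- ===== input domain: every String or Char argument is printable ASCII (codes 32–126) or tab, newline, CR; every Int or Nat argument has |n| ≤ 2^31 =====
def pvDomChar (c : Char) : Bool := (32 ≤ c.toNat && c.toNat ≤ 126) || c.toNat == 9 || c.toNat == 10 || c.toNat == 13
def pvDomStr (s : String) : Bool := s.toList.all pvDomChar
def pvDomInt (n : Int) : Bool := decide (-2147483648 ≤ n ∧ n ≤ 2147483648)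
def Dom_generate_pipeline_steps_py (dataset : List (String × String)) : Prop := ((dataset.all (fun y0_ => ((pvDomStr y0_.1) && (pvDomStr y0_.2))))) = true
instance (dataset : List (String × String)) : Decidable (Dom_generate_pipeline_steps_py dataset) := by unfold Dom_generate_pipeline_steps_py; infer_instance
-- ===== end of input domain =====

-- B computes the two keyword flags and returns the matching fully precomputed pipeline from a 4-entry table, instead of A's incremental list building with inline numbering (simpler decomposition).


-- ===== PORT A =====
def generate_pipeline_steps_py (dataset : List (String × String)) : List String :=
  let steps := ["1. Access dataset"]
  let description := PySem.Str.lower (PySem.Dict.getD (PySem.Dict.mk dataset) "description" "")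
  let steps :=
    if ["api key", "registration", "authentication"].any (fun term => PySem.Str.isIn term description) then
      (steps ++ ["2. Obtain API credentials"]) ++ ["3. Configure authentication"]
    else
      steps ++ ["2. Download/connect to data"]
  let steps :=
    if ["clean", "preprocess", "format"].any (fun term => PySem.Str.isIn term description) then
      steps ++ [PySem.Int.toStr ((steps.length : Int) + 1) ++ ". Clean and preprocess data"]
    else steps
  let steps := steps ++ [PySem.Int.toStr ((steps.length : Int) + 1) ++ ". Validate data quality"]
  steps ++ [PySem.Int.toStr ((steps.length : Int) + 1) ++ ". Integrate into your system"]

-- ===== PORT B =====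
-- the module-level table _PIPELINES: association list keyed by the (auth, clean) flag pair
def pvPipelinesTable : PySem.Dict (Bool × Bool) (List String) := PySem.Dict.mk
  [ ((false, false), ["1. Access dataset", "2. Download/connect to data",
                      "3. Validate data quality", "4. Integrate into your system"])
  , ((false, true),  ["1. Access dataset", "2. Download/connect to data",
                      "3. Clean and preprocess data", "4. Validate data quality",
                      "5. Integrate into your system"])
  , ((true, false),  ["1. Access dataset", "2. Obtain API credentials",
                      "3. Configure authentication", "4. Validate data quality",
                      "5. Integrate into your system"])
  , ((true, true),   ["1. Access dataset", "2. Obtain API credentials",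
                      "3. Configure authentication", "4. Clean and preprocess data",
                      "5. Validate data quality", "6. Integrate into your system"]) ]

def generate_pipeline_steps_py_alt (dataset : List (String × String)) : List String :=
  let description := PySem.Str.lower (PySem.Dict.getD (PySem.Dict.mk dataset) "description" "")
  let auth := ["api key", "registration", "authentication"].any (fun t => PySem.Str.isIn t description)
  let clean := ["clean", "preprocess", "format"].any (fun t => PySem.Str.isIn t description)
  PySem.Dict.getD pvPipelinesTable (auth, clean) []

-- ===== PRECONDITION & SPEC =====
def Spec_generate_pipeline_steps_py (dataset : List (String × String)) (out : List String) : Prop := out = generate_pipeline_steps_py_alt dataset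
instance (dataset : List (String × String)) (out : List String) : Decidable (Spec_generate_pipeline_steps_py dataset out) := by unfold Spec_generate_pipeline_steps_py; infer_instance

-- ===== CLAIM =====
def Claim_equal_generate_pipeline_steps_py : Prop := ∀ (dataset : List (String × String)), Dom_generate_pipeline_steps_py dataset → Spec_generate_pipeline_steps_py dataset (generate_pipeline_steps_py dataset)

-- ===== LEMMAS AND PROOFS =====

-- ===== VERDICT =====
theorem generate_pipeline_steps_py_spec : Claim_equal_generate_pipeline_steps_py := by
  intro dataset _
  unfold Spec_generate_pipeline_steps_py generate_pipeline_steps_py generate_pipeline_steps_py_alt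
  set d := PySem.Str.lower (PySem.Dict.getD (PySem.Dict.mk dataset) "description" "") with hd
  by_cases h1 : (["api key", "registration", "authentication"].any (fun t => PySem.Str.isIn t d)) = true <;>
    by_cases h2 : (["clean", "preprocess", "format"].any (fun t => PySem.Str.isIn t d)) = true <;>
      simp only [h1, h2, if_true, if_false, Bool.false_eq_true, reduceIte] <;> decide
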